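-- pv_equiv track=rewrite | github.com/aporb/data-science-learning-handbook | security-compliance/multi-classification/engines/query/advanced_result_filter.py | _evaluate_access_rules
-- ===== SOURCE A (Python) =====
-- from typing import List, Dict, Set, Optional, Any, Union, Tuple, Callable
--
-- def _evaluate_access_rules(rules: List[str], context: Dict[str, Any]) -> bool:
--     """Evaluate additional access rules."""
--     for rule in rules:
--         if rule == "NEED_TO_KNOW":
--             if not context.get('need_to_know_approved', False):
--                 return False
--         elif rule == "EXECUTIVE_ACCESS_ONLY":
--             if not context.get('executive_access', False):
--                 return False
--         elif rule == "AUDIT_REQUIRED":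
--             if not context.get('audit_logged', False):
--                 return False
--
--     return True
-- ===== SOURCE B (Python) =====
-- def _evaluate_access_rules(rules, context):
--     """Evaluate additional access rules."""
--     if "NEED_TO_KNOW" in rules and not context.get('need_to_know_approved', False):
--         return False
--     if "EXECUTIVE_ACCESS_ONLY" in rules and not context.get('executive_access', False):
--         return False
--     if "AUDIT_REQUIRED" in rules and not context.get('audit_logged', False):
--         return False
--     return True
-- ===== Notes on version B (the rewrite author's own statement) =====
-- stated objective: simpler
-- what changed: Replaced the loop over rules with a branch switch by three independent membership guards, one per known requirement; the result is the AND of three conditions, which is order- and duplicate-independent.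
import Mathlib
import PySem

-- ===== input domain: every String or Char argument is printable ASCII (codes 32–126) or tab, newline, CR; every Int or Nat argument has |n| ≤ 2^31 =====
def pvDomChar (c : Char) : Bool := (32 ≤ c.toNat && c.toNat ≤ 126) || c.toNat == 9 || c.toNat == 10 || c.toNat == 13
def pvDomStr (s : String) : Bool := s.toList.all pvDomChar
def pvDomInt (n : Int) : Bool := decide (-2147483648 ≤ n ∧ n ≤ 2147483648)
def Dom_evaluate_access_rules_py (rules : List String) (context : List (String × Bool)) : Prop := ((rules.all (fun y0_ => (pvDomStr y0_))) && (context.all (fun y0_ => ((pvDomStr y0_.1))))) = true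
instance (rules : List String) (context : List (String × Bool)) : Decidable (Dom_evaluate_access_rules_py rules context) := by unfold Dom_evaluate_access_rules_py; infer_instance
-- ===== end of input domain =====

-- ===== PORT A =====
-- context.get(key, False): first-match lookup in the association list (exact for a Python dict)
def ctxGetD (context : List (String × Bool)) (k : String) (dflt : Bool) : Bool :=
  match context.find? (fun p => p.1 == k) with
  | some p => p.2
  | none => dflt

-- A: single pass over rules; each recognised rule checks its context flag and may return False.
def evalRulesLoop (context : List (String × Bool)) : List String → Bool
  | [] => true
  | rule :: rest =>
    if rule == "NEED_TO_KNOW" then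
      if !(ctxGetD context "need_to_know_approved" false) then false
      else evalRulesLoop context rest
    else if rule == "EXECUTIVE_ACCESS_ONLY" then
      if !(ctxGetD context "executive_access" false) then false
      else evalRulesLoop context rest
    else if rule == "AUDIT_REQUIRED" then
      if !(ctxGetD context "audit_logged" false) then false
      else evalRulesLoop context rest
    else evalRulesLoop context rest

def evaluate_access_rules_py (rules : List String) (context : List (String × Bool)) : Bool :=
  evalRulesLoop context rules

-- ===== PORT B =====
-- B: three independent membership guards, one per known requirement.
def evaluate_access_rules_py_alt (rules : List String) (context : List (String × Bool)) : Bool :=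
  if rules.contains "NEED_TO_KNOW" && !(ctxGetD context "need_to_know_approved" false) then false
  else if rules.contains "EXECUTIVE_ACCESS_ONLY" && !(ctxGetD context "executive_access" false) then false
  else if rules.contains "AUDIT_REQUIRED" && !(ctxGetD context "audit_logged" false) then false
  else true

-- ===== PRECONDITION & SPEC =====
def Spec_evaluate_access_rules_py (rules : List String) (context : List (String × Bool)) (out : Bool) : Prop := out = evaluate_access_rules_py_alt rules context
instance (rules : List String) (context : List (String × Bool)) (out : Bool) : Decidable (Spec_evaluate_access_rules_py rules context out) := by unfold Spec_evaluate_access_rules_py; infer_instance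

-- ===== CLAIM (what is proved, stated in full; the proofs are below) =====
def Claim_equal_evaluate_access_rules_py : Prop := ∀ (rules : List String) (context : List (String × Bool)), Dom_evaluate_access_rules_py rules context → Spec_evaluate_access_rules_py rules context (evaluate_access_rules_py rules context)

-- ===== LEMMAS AND PROOFS =====
theorem evalRulesLoop_eq_alt (context : List (String × Bool)) (rules : List String) :
    evalRulesLoop context rules = evaluate_access_rules_py_alt rules context := by
  induction rules with
  | nil => rfl
  | cons r rest ih =>
      unfold evaluate_access_rules_py_alt at ih ⊢
      simp only [evalRulesLoop, List.contains_cons]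
      by_cases h1 : r = "NEED_TO_KNOW"
      · subst h1
        cases hp : ctxGetD context "need_to_know_approved" false <;>
          simp [ih, hp]
      · by_cases h2 : r = "EXECUTIVE_ACCESS_ONLY"
        · subst h2
          cases hq : ctxGetD context "executive_access" false <;>
            simp [ih, hq]
        · by_cases h3 : r = "AUDIT_REQUIRED"
          · subst h3
            cases hs : ctxGetD context "audit_logged" false <;>
              simp [ih, hs]
          · simp [ih, h1, h2, h3, Ne.symm h1, Ne.symm h2, Ne.symm h3]

-- ===== VERDICT (by name: the statement is the Claim_ definition above) =====
theorem evaluate_access_rules_py_spec : Claim_equal_evaluate_access_rules_py := by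
  intro rules context _
  unfold Spec_evaluate_access_rules_py evaluate_access_rules_py
  exact evalRulesLoop_eq_alt context rules
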